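-- pv_equiv track=rewrite | github.com/tony102741/firmware_project | src/core/analyzer/dataflow.py | has_dangerous_memcpy_context
-- ===== SOURCE A (Python) =====
-- def has_dangerous_memcpy_context(strings):
--     """
--     __memcpy_chk / memcpy is dangerous only when the copy length plausibly
--     originates from external data.  Indicators:
--       - Network byte-order conversions (ntohl/ntohs) → length from network
--       - parse+len/size co-occurrence → variable-length protocol field
--     """
--     has_memcpy = any(
--         "__memcpy_chk" in s.lower() or "memcpy(" in s.lower()
--         for s in strings
--     )
--     if not has_memcpy:
--         return False
--
--     for s in strings:
--         l = s.lower()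
--         if any(k in l for k in ["ntohl", "ntohs", "htonl", "htons"]):
--             return True
--         if "parse" in l and any(k in l for k in ["len", "size", "length"]):
--             return True
--         if any(k in l for k in ["packet", "payload"]) and any(k in l for k in ["len", "size"]):
--             return True
--
--     return False
-- ===== SOURCE B (Python) =====
-- _KW = [
--     ("__memcpy_chk", 1), ("memcpy(", 1),
--     ("ntohl", 2), ("ntohs", 2), ("htonl", 2), ("htons", 2),
--     ("parse", 4),
--     ("len", 8), ("size", 8),
--     ("length", 16),
--     ("packet", 32), ("payload", 32),
-- ]
--
-- def has_dangerous_memcpy_context(strings):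
--     combined = 0
--     for s in strings:
--         l = s.lower()
--         m = 0
--         for kw, bit in _KW:
--             if kw in l:
--                 m |= bit
--         if (m & 2) or (m & 4 and (m & 8 or m & 16)) or (m & 32 and m & 8):
--             m |= 64
--         combined |= m
--     return bool(combined & 1 and combined & 64)
-- ===== Notes on version B (the rewrite author's own statement) =====
-- stated objective: alternative
-- what changed: B replaces A's two scans of hard-coded boolean keyword tests with a table-driven bitmask classifier: one pass maps each string to a bit mask via a keyword->bit table, ORs a derived indicator bit into a combined mask, and reads the answer off two bits of the combined mask.
import Mathlib
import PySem

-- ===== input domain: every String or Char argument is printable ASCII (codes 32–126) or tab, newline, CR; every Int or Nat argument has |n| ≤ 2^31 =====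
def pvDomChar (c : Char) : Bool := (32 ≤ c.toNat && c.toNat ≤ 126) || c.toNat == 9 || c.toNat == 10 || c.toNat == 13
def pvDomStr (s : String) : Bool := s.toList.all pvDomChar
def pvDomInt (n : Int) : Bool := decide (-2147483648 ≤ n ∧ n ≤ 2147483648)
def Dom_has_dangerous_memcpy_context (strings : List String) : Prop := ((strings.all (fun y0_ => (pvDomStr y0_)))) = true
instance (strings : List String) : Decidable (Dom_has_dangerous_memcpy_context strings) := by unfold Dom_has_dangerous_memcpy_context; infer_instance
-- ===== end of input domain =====

-- B replaces A's hard-coded two-scan boolean logic by a table-driven bitmask classifier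
-- (one keyword→bit table, one pass OR-ing per-string masks); objective: alternative.

-- ===== PORT A =====
-- the 'for s in strings: … return True …' loop of A, returning False when it falls off the end
def pvLoopA : List String → Bool
  | [] => false
  | s :: rest =>
    let l := PySem.Str.lower s
    if ["ntohl", "ntohs", "htonl", "htons"].any (fun k => PySem.Str.isIn k l) then true
    else if PySem.Str.isIn "parse" l && ["len", "size", "length"].any (fun k => PySem.Str.isIn k l) then true
    else if ["packet", "payload"].any (fun k => PySem.Str.isIn k l) && ["len", "size"].any (fun k => PySem.Str.isIn k l) then true
    else pvLoopA rest

def has_dangerous_memcpy_context (strings : List String) : Bool :=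
  let has_memcpy := strings.any (fun s =>
    PySem.Str.isIn "__memcpy_chk" (PySem.Str.lower s) || PySem.Str.isIn "memcpy(" (PySem.Str.lower s))
  if !has_memcpy then false
  else pvLoopA strings

-- ===== PORT B =====
-- the keyword→bit table _KW of Source B
def pvKW : List (String × Nat) :=
  [("__memcpy_chk", 1), ("memcpy(", 1),
   ("ntohl", 2), ("ntohs", 2), ("htonl", 2), ("htons", 2),
   ("parse", 4),
   ("len", 8), ("size", 8),
   ("length", 16),
   ("packet", 32), ("payload", 32)]

def has_dangerous_memcpy_context_alt (strings : List String) : Bool :=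
  let combined := strings.foldl (fun (combined : Nat) s =>
    let l := PySem.Str.lower s
    let m := pvKW.foldl (fun (m : Nat) p => if PySem.Str.isIn p.1 l then m ||| p.2 else m) 0
    let m := if (m &&& 2 ≠ 0) ∨ ((m &&& 4 ≠ 0) ∧ ((m &&& 8 ≠ 0) ∨ (m &&& 16 ≠ 0))) ∨ ((m &&& 32 ≠ 0) ∧ (m &&& 8 ≠ 0))
             then m ||| 64 else m
    combined ||| m) 0
  decide (combined &&& 1 ≠ 0) && decide (combined &&& 64 ≠ 0)

-- ===== PRECONDITION & SPEC =====
def Spec_has_dangerous_memcpy_context (strings : List String) (out : Bool) : Prop := out = has_dangerous_memcpy_context_alt strings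
instance (strings : List String) (out : Bool) : Decidable (Spec_has_dangerous_memcpy_context strings out) := by unfold Spec_has_dangerous_memcpy_context; infer_instance

-- ===== CLAIM (what is proved, stated in full; the proofs are below) =====
def Claim_equal_has_dangerous_memcpy_context : Prop := ∀ (strings : List String), Dom_has_dangerous_memcpy_context strings → Spec_has_dangerous_memcpy_context strings (has_dangerous_memcpy_context strings)

-- ===== LEMMAS AND PROOFS =====

-- per-string predicates
def pvMemHit (s : String) : Bool :=
  PySem.Str.isIn "__memcpy_chk" (PySem.Str.lower s) || PySem.Str.isIn "memcpy(" (PySem.Str.lower s)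

def pvIndHit (s : String) : Bool :=
  ["ntohl", "ntohs", "htonl", "htons"].any (fun k => PySem.Str.isIn k (PySem.Str.lower s))
    || (PySem.Str.isIn "parse" (PySem.Str.lower s) && ["len", "size", "length"].any (fun k => PySem.Str.isIn k (PySem.Str.lower s)))
    || (["packet", "payload"].any (fun k => PySem.Str.isIn k (PySem.Str.lower s)) && ["len", "size"].any (fun k => PySem.Str.isIn k (PySem.Str.lower s)))

theorem pvIf3 (a b c r : Bool) :
    (if a then true else if b then true else if c then true else r) = (a || b || c || r) := by
  cases a <;> cases b <;> cases c <;> simp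

-- A's loop returns true iff some string is an indicator
theorem pvLoopA_eq_any (strings : List String) : pvLoopA strings = strings.any pvIndHit := by
  induction strings with
  | nil => rfl
  | cons s rest ih =>
    simp only [pvLoopA, pvIf3, ih, List.any_cons, pvIndHit]

-- generic OR-fold lemmas
theorem pvFoldOr_acc {α : Type} (g : α → Nat) (xs : List α) (a : Nat) :
    xs.foldl (fun c x => c ||| g x) a = a ||| xs.foldl (fun c x => c ||| g x) 0 := by
  induction xs generalizing a with
  | nil => simp
  | cons x xs ih =>
    simp only [List.foldl_cons]
    rw [ih (a ||| g x), ih (0 ||| g x)]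
    simp [Nat.or_assoc]

theorem pvFoldOr_testBit {α : Type} (g : α → Nat) (xs : List α) (i : Nat) :
    (xs.foldl (fun c x => c ||| g x) 0).testBit i = xs.any (fun x => (g x).testBit i) := by
  induction xs with
  | nil => simp
  | cons x xs ih =>
    simp only [List.foldl_cons]
    rw [pvFoldOr_acc]
    simp [Nat.testBit_or, ih]

-- the per-string keyword mask of B, named
def pvMask (l : String) : Nat :=
  pvKW.foldl (fun (m : Nat) p => if PySem.Str.isIn p.1 l then m ||| p.2 else m) 0

-- B's per-string contribution (mask plus the derived indicator bit 64), named
def pvMaskF (s : String) : Nat :=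
  if (pvMask (PySem.Str.lower s) &&& 2 ≠ 0)
      ∨ ((pvMask (PySem.Str.lower s) &&& 4 ≠ 0) ∧ ((pvMask (PySem.Str.lower s) &&& 8 ≠ 0) ∨ (pvMask (PySem.Str.lower s) &&& 16 ≠ 0)))
      ∨ ((pvMask (PySem.Str.lower s) &&& 32 ≠ 0) ∧ (pvMask (PySem.Str.lower s) &&& 8 ≠ 0))
  then pvMask (PySem.Str.lower s) ||| 64 else pvMask (PySem.Str.lower s)

theorem pvMask_testBit (l : String) (i : Nat) :
    (pvMask l).testBit i = pvKW.any (fun p => PySem.Str.isIn p.1 l && (p.2).testBit i) := by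
  unfold pvMask
  have hfun : (fun (m : Nat) (p : String × Nat) => if PySem.Str.isIn p.1 l then m ||| p.2 else m)
       = (fun (m : Nat) p => m ||| (if PySem.Str.isIn p.1 l then p.2 else 0)) := by
    funext m p; split <;> simp
  rw [hfun, pvFoldOr_testBit]
  apply congrArg
  funext p
  split <;> simp_all

-- m &&& 2^k ≠ 0 ↔ testBit k, stated for a literal power v
theorem pvAndPow (m : Nat) (k : Nat) (v : Nat) (hv : v = 2 ^ k) :
    (m &&& v ≠ 0) ↔ m.testBit k = true := by
  subst hv
  rw [Nat.and_two_pow]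
  cases h : m.testBit k
  · simp
  · simpa using pow_ne_zero k (two_ne_zero)

theorem pvMask_bit0 (l : String) : (pvMask l).testBit 0
    = (PySem.Str.isIn "__memcpy_chk" l || PySem.Str.isIn "memcpy(" l) := by
  rw [pvMask_testBit]
  simp [pvKW, (by decide : (1:Nat).testBit 0 = true), (by decide : (2:Nat).testBit 0 = false), (by decide : (4:Nat).testBit 0 = false), (by decide : (8:Nat).testBit 0 = false), (by decide : (16:Nat).testBit 0 = false), (by decide : (32:Nat).testBit 0 = false)]

theorem pvMask_bit1 (l : String) : (pvMask l).testBit 1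
    = (PySem.Str.isIn "ntohl" l || PySem.Str.isIn "ntohs" l || PySem.Str.isIn "htonl" l || PySem.Str.isIn "htons" l) := by
  rw [pvMask_testBit]
  simp [pvKW, (by decide : (1:Nat).testBit 1 = false), (by decide : (2:Nat).testBit 1 = true), (by decide : (4:Nat).testBit 1 = false), (by decide : (8:Nat).testBit 1 = false), (by decide : (16:Nat).testBit 1 = false), (by decide : (32:Nat).testBit 1 = false), Bool.or_assoc]

theorem pvMask_bit2 (l : String) : (pvMask l).testBit 2 = PySem.Str.isIn "parse" l := by
  rw [pvMask_testBit]
  simp [pvKW, (by decide : (1:Nat).testBit 2 = false), (by decide : (2:Nat).testBit 2 = false), (by decide : (4:Nat).testBit 2 = true), (by decide : (8:Nat).testBit 2 = false), (by decide : (16:Nat).testBit 2 = false), (by decide : (32:Nat).testBit 2 = false)]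

theorem pvMask_bit3 (l : String) : (pvMask l).testBit 3
    = (PySem.Str.isIn "len" l || PySem.Str.isIn "size" l) := by
  rw [pvMask_testBit]
  simp [pvKW, (by decide : (1:Nat).testBit 3 = false), (by decide : (2:Nat).testBit 3 = false), (by decide : (4:Nat).testBit 3 = false), (by decide : (8:Nat).testBit 3 = true), (by decide : (16:Nat).testBit 3 = false), (by decide : (32:Nat).testBit 3 = false)]

theorem pvMask_bit4 (l : String) : (pvMask l).testBit 4 = PySem.Str.isIn "length" l := by
  rw [pvMask_testBit]
  simp [pvKW, (by decide : (1:Nat).testBit 4 = false), (by decide : (2:Nat).testBit 4 = false), (by decide : (4:Nat).testBit 4 = false), (by decide : (8:Nat).testBit 4 = false), (by decide : (16:Nat).testBit 4 = true), (by decide : (32:Nat).testBit 4 = false)]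

theorem pvMask_bit5 (l : String) : (pvMask l).testBit 5
    = (PySem.Str.isIn "packet" l || PySem.Str.isIn "payload" l) := by
  rw [pvMask_testBit]
  simp [pvKW, (by decide : (1:Nat).testBit 5 = false), (by decide : (2:Nat).testBit 5 = false), (by decide : (4:Nat).testBit 5 = false), (by decide : (8:Nat).testBit 5 = false), (by decide : (16:Nat).testBit 5 = false), (by decide : (32:Nat).testBit 5 = true)]

theorem pvMask_bit6 (l : String) : (pvMask l).testBit 6 = false := by
  rw [pvMask_testBit]
  simp [pvKW, (by decide : (1:Nat).testBit 6 = false), (by decide : (2:Nat).testBit 6 = false), (by decide : (4:Nat).testBit 6 = false), (by decide : (8:Nat).testBit 6 = false), (by decide : (16:Nat).testBit 6 = false), (by decide : (32:Nat).testBit 6 = false)]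

theorem pvMaskF_bit0 (s : String) : (pvMaskF s).testBit 0 = pvMemHit s := by
  unfold pvMaskF pvMemHit
  split
  · rw [Nat.testBit_or, pvMask_bit0, (by decide : (64:Nat).testBit 0 = false), Bool.or_false]
  · rw [pvMask_bit0]

theorem pvLogicA (a1 a2 a3 a4 p l1 l2 lg k1 k2 : Prop) :
    ((((a1 ∨ a2) ∨ a3) ∨ a4) ∨ (p ∧ ((l1 ∨ l2) ∨ lg) ∨ (k1 ∨ k2) ∧ (l1 ∨ l2)))
      ↔ (((a1 ∨ a2 ∨ a3 ∨ a4) ∨ p ∧ (l1 ∨ l2 ∨ lg)) ∨ (k1 ∨ k2) ∧ (l1 ∨ l2)) := by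
  tauto

theorem pvMaskF_bit6 (s : String) : (pvMaskF s).testBit 6 = pvIndHit s := by
  unfold pvMaskF pvIndHit
  split
  next hc =>
    rw [pvAndPow _ 1 2 rfl, pvAndPow _ 2 4 rfl, pvAndPow _ 3 8 rfl, pvAndPow _ 4 16 rfl, pvAndPow _ 5 32 rfl] at hc
    rw [pvMask_bit1, pvMask_bit2, pvMask_bit3, pvMask_bit4, pvMask_bit5] at hc
    rw [Nat.testBit_or, pvMask_bit6, (by decide : (64:Nat).testBit 6 = true), Bool.false_or]
    symm
    simp only [List.any_cons, List.any_nil, Bool.or_eq_true, Bool.and_eq_true, Bool.or_false] at hc ⊢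
    exact (pvLogicA _ _ _ _ _ _ _ _ _ _).mp hc
  next hc =>
    rw [pvAndPow _ 1 2 rfl, pvAndPow _ 2 4 rfl, pvAndPow _ 3 8 rfl, pvAndPow _ 4 16 rfl, pvAndPow _ 5 32 rfl] at hc
    rw [pvMask_bit1, pvMask_bit2, pvMask_bit3, pvMask_bit4, pvMask_bit5] at hc
    rw [pvMask_bit6]
    simp only [Bool.or_eq_true, Bool.and_eq_true] at hc
    symm
    rw [Bool.eq_false_iff]
    intro hx
    simp only [List.any_cons, List.any_nil, Bool.or_eq_true, Bool.and_eq_true, Bool.or_false] at hx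
    exact hc ((pvLogicA _ _ _ _ _ _ _ _ _ _).mpr hx)

theorem pvAltEq (strings : List String) :
    has_dangerous_memcpy_context_alt strings = (strings.any pvMemHit && strings.any pvIndHit) := by
  have h : has_dangerous_memcpy_context_alt strings
      = (decide ((strings.foldl (fun c s => c ||| pvMaskF s) 0) &&& 1 ≠ 0)
         && decide ((strings.foldl (fun c s => c ||| pvMaskF s) 0) &&& 64 ≠ 0)) := rfl
  rw [h]
  have f0 : (fun s => (pvMaskF s).testBit 0) = pvMemHit := funext pvMaskF_bit0
  have f6 : (fun s => (pvMaskF s).testBit 6) = pvIndHit := funext pvMaskF_bit6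
  have c1 : decide ((strings.foldl (fun c s => c ||| pvMaskF s) 0) &&& 1 ≠ 0) = strings.any pvMemHit := by
    rw [Bool.eq_iff_iff, decide_eq_true_iff]
    rw [pvAndPow _ 0 1 rfl, pvFoldOr_testBit, f0]
  have c6 : decide ((strings.foldl (fun c s => c ||| pvMaskF s) 0) &&& 64 ≠ 0) = strings.any pvIndHit := by
    rw [Bool.eq_iff_iff, decide_eq_true_iff]
    rw [pvAndPow _ 6 64 rfl, pvFoldOr_testBit, f6]
  rw [c1, c6]

-- ===== VERDICT (by name: the statement is the Claim_ definition above) =====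
theorem has_dangerous_memcpy_context_spec : Claim_equal_has_dangerous_memcpy_context := by
  intro strings _
  unfold Spec_has_dangerous_memcpy_context
  have hA : has_dangerous_memcpy_context strings
      = (if !(strings.any pvMemHit) then false else pvLoopA strings) := rfl
  rw [hA, pvAltEq, pvLoopA_eq_any]
  cases h : strings.any pvMemHit <;> simp [h]
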